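-- pv_equiv track=rewrite | github.com/William-CarterG/Algorithms-Competitive-Programming-Solutions | Lecture 1/394 - Mapmaker.py | physical_address
-- ===== SOURCE A (Python) =====
-- def physical_address(name, base, element_size, dimensions, lower_bounds, upper_bounds, indices):
--     #Calculate constants
--     c = [0] * (dimensions + 1)
--     c[dimensions] = element_size
--     for d in range(dimensions - 1, 0, -1):
--         c[d] = c[d + 1] * (upper_bounds[d] - lower_bounds[d] + 1)
--
--     c[0] = base
--     for d in range(1, dimensions + 1):
--         c[0] -= c[d] * lower_bounds[d - 1]
--
--     #Calculate address
--     address = c[0]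
--     for d in range(dimensions):
--         address += c[d + 1] * indices[d]
--
--     return f"{name}[{', '.join(map(str, indices))}] = {address}"
-- ===== SOURCE B (Python) =====
-- def physical_address(name, base, element_size, dimensions, lower_bounds, upper_bounds, indices):
--     # Horner's rule: fold dimensions left-to-right into a single zero-based offset.
--     offset = 0
--     for d in range(dimensions):
--         if d:
--             offset *= upper_bounds[d] - lower_bounds[d] + 1
--         offset += indices[d] - lower_bounds[d]
--     address = base + offset * element_size
--     return f"{name}[{', '.join(map(str, indices))}] = {address}"
-- ===== Notes on version B (the rewrite author's own statement) =====
-- stated objective: simpler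
-- what changed: Replaces A's three passes over an explicitly stored coefficient table (built right-to-left, then folded into c[0], then combined with the indices) by a single left-to-right Horner-rule fold accumulating one zero-based offset, multiplying by element_size once at the end.
import Mathlib
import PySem

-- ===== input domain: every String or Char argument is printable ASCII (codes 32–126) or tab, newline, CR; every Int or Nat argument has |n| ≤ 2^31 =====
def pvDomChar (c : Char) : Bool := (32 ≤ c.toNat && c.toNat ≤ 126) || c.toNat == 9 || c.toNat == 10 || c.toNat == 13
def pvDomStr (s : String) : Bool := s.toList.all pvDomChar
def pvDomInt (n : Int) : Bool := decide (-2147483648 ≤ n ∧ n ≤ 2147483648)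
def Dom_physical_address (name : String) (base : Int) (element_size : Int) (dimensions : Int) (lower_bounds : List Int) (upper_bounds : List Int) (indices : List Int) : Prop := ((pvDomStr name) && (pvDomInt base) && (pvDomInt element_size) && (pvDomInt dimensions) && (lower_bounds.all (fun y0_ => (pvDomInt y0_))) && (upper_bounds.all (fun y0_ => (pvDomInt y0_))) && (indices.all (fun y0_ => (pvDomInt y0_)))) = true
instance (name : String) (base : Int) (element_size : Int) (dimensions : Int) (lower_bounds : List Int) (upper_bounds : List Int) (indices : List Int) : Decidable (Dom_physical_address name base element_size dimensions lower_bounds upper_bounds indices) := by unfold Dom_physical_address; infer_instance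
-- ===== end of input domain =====

-- B replaces A's three-pass coefficient-table construction by a single Horner-rule fold
-- into one zero-based offset (objective: simpler; same O(n) cost).


-- ===== PORT A =====
def physical_address (name : String) (base : Int) (element_size : Int) (dimensions : Int) (lower_bounds : List Int) (upper_bounds : List Int) (indices : List Int) : String :=
  -- c = [0] * (dimensions + 1); c[dimensions] = element_size
  let c := List.replicate (dimensions + 1).toNat (0 : Int)
  let c := PySem.List.pySetD c dimensions element_size
  -- for d in range(dimensions - 1, 0, -1): c[d] = c[d+1] * (upper_bounds[d] - lower_bounds[d] + 1)
  let c := (PySem.List.pyRange (dimensions - 1) 0 (-1)).foldl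
    (fun c d => PySem.List.pySetD c d
      (PySem.List.pyGetD c (d + 1) 0 *
        (PySem.List.pyGetD upper_bounds d 0 - PySem.List.pyGetD lower_bounds d 0 + 1))) c
  -- c[0] = base; for d in range(1, dimensions + 1): c[0] -= c[d] * lower_bounds[d-1]
  let c := PySem.List.pySetD c 0 base
  let c := (PySem.List.pyRange 1 (dimensions + 1) 1).foldl
    (fun c d => PySem.List.pySetD c 0
      (PySem.List.pyGetD c 0 0 -
        PySem.List.pyGetD c d 0 * PySem.List.pyGetD lower_bounds (d - 1) 0)) c
  -- address = c[0]; for d in range(dimensions): address += c[d+1] * indices[d]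
  let address := (PySem.List.pyRange 0 dimensions 1).foldl
    (fun a d => a + PySem.List.pyGetD c (d + 1) 0 * PySem.List.pyGetD indices d 0)
    (PySem.List.pyGetD c 0 0)
  name ++ "[" ++ PySem.Str.join ", " (indices.map PySem.Int.toStr) ++ "] = " ++ PySem.Int.toStr address

-- ===== PORT B =====
def physical_address_alt (name : String) (base : Int) (element_size : Int) (dimensions : Int) (lower_bounds : List Int) (upper_bounds : List Int) (indices : List Int) : String :=
  -- offset = 0
  -- for d in range(dimensions):
  --   if d: offset *= upper_bounds[d] - lower_bounds[d] + 1
  --   offset += indices[d] - lower_bounds[d]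
  let offset := (PySem.List.pyRange 0 dimensions 1).foldl
    (fun offset d =>
      (if d ≠ 0 then
        offset * (PySem.List.pyGetD upper_bounds d 0 - PySem.List.pyGetD lower_bounds d 0 + 1)
      else offset) + (PySem.List.pyGetD indices d 0 - PySem.List.pyGetD lower_bounds d 0)) 0
  let address := base + offset * element_size
  name ++ "[" ++ PySem.Str.join ", " (indices.map PySem.Int.toStr) ++ "] = " ++ PySem.Int.toStr address

-- ===== PRECONDITION & SPEC =====
-- Exactly the inputs on which the Python A returns (no IndexError): dimensions ≥ 0,
-- lower_bounds and indices cover indices 0..dimensions-1, and upper_bounds covers 1..dimensions-1.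
def Pre_physical_address (name : String) (base : Int) (element_size : Int) (dimensions : Int) (lower_bounds : List Int) (upper_bounds : List Int) (indices : List Int) : Prop :=
  0 ≤ dimensions ∧ dimensions ≤ (lower_bounds.length : Int) ∧ dimensions ≤ (indices.length : Int) ∧
  (dimensions ≤ 1 ∨ dimensions ≤ (upper_bounds.length : Int))
instance (name : String) (base : Int) (element_size : Int) (dimensions : Int) (lower_bounds : List Int) (upper_bounds : List Int) (indices : List Int) : Decidable (Pre_physical_address name base element_size dimensions lower_bounds upper_bounds indices) := by unfold Pre_physical_address; infer_instance

def pvWitness_physical_address : String × Int × Int × Int × List Int × List Int × List Int :=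
  ("arr", 100, 4, 2, [1, 0], [3, 5], [2, 4])

def Spec_physical_address (name : String) (base : Int) (element_size : Int) (dimensions : Int) (lower_bounds : List Int) (upper_bounds : List Int) (indices : List Int) (out : String) : Prop := out = physical_address_alt name base element_size dimensions lower_bounds upper_bounds indices
instance (name : String) (base : Int) (element_size : Int) (dimensions : Int) (lower_bounds : List Int) (upper_bounds : List Int) (indices : List Int) (out : String) : Decidable (Spec_physical_address name base element_size dimensions lower_bounds upper_bounds indices out) := by unfold Spec_physical_address; infer_instance

-- ===== CLAIM (what is proved, stated in full; the proofs are below) =====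
def Claim_equal_physical_address : Prop := ∀ (name : String) (base : Int) (element_size : Int) (dimensions : Int) (lower_bounds : List Int) (upper_bounds : List Int) (indices : List Int), Dom_physical_address name base element_size dimensions lower_bounds upper_bounds indices → Pre_physical_address name base element_size dimensions lower_bounds upper_bounds indices → Spec_physical_address name base element_size dimensions lower_bounds upper_bounds indices (physical_address name base element_size dimensions lower_bounds upper_bounds indices)

-- ===== LEMMAS AND PROOFS =====

-- width of dimension d
def pvW (upper_bounds lower_bounds : List Int) (d : Int) : Int :=
  PySem.List.pyGetD upper_bounds d 0 - PySem.List.pyGetD lower_bounds d 0 + 1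

-- product of the widths of dimensions a..b-1
def pvP (upper_bounds lower_bounds : List Int) (a b : Int) : Int :=
  ((PySem.List.pyRange a b 1).map (pvW upper_bounds lower_bounds)).prod

-- final value of A's c[d] for 1 <= d <= n
def pvC (element_size : Int) (upper_bounds lower_bounds : List Int) (n d : Int) : Int :=
  element_size * pvP upper_bounds lower_bounds d n

theorem pvP_self (ub lb : List Int) (b : Int) : pvP ub lb b b = 1 := by
  simp [pvP, PySem.List.pyRange_one_eq_nil le_rfl]

theorem pvC_succ (es : Int) (ub lb : List Int) (n d : Int) (h : d < n) :
    pvC es ub lb n d = pvC es ub lb n (d + 1) * pvW ub lb d := by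
  unfold pvC pvP
  rw [PySem.List.pyRange_one_cons h]
  simp [List.prod_cons]; ring

theorem pvP_succ_right (ub lb : List Int) (a b : Int) (h : a ≤ b) :
    pvP ub lb a (b + 1) = pvP ub lb a b * pvW ub lb b := by
  unfold pvP
  rw [PySem.List.pyRange_one_succ_right h]
  simp [List.prod_append]

theorem loop1 (es : Int) (ub lb : List Int) (n : Int) :
    ∀ (k : Nat) (c : List Int), (k : Int) ≤ n - 1 → c.length = (n + 1).toNat →
    (∀ d : Int, (k : Int) < d → d ≤ n → PySem.List.pyGetD c d 0 = pvC es ub lb n d) →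
    (((PySem.List.pyRange (k : Int) 0 (-1)).foldl
        (fun c d => PySem.List.pySetD c d (PySem.List.pyGetD c (d + 1) 0 * pvW ub lb d)) c).length = c.length ∧
     PySem.List.pyGetD ((PySem.List.pyRange (k : Int) 0 (-1)).foldl
        (fun c d => PySem.List.pySetD c d (PySem.List.pyGetD c (d + 1) 0 * pvW ub lb d)) c) 0 0 = PySem.List.pyGetD c 0 0 ∧
     (∀ d : Int, 0 < d → d ≤ n → PySem.List.pyGetD ((PySem.List.pyRange (k : Int) 0 (-1)).foldl
        (fun c d => PySem.List.pySetD c d (PySem.List.pyGetD c (d + 1) 0 * pvW ub lb d)) c) d 0 = pvC es ub lb n d)) := by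
  intro k
  induction k with
  | zero =>
    intro c hk hlen hc
    rw [PySem.List.pyRange_neg_one_eq_nil (by norm_num)]
    refine ⟨rfl, rfl, ?_⟩
    intro d hd hdn
    exact hc d (by exact_mod_cast hd) hdn
  | succ k ih =>
    intro c hk hlen hc
    rw [PySem.List.pyRange_neg_one_cons (by push_cast; omega)]
    simp only [List.foldl_cons]
    have hkn : ((k : Int) + 1) + 1 ≤ n := by push_cast at hk ⊢; omega
    have hidx : (k + 1 : Nat) < c.length := by
      rw [hlen]; omega
    set v := PySem.List.pyGetD c (((k : Nat) : Int) + 1 + 1) 0 * pvW ub lb (((k : Nat) : Int) + 1) with hv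
    have hset : ∀ (m : Int), 0 ≤ m → PySem.List.pyGetD (PySem.List.pySetD c (((k : Nat) : Int) + 1) v) m 0
        = if m = ((k : Nat) : Int) + 1 then v else PySem.List.pyGetD c m 0 := by
      intro m hm
      have hmc : m = ((m.toNat : Nat) : Int) := by omega
      rw [hmc]
      have := PySem.List.pyGetD_pySetD_natCast (xs := c) (n := k + 1) (v := v) (m := m.toNat) (d := 0) hidx
      push_cast at this ⊢
      rw [this]
      by_cases h : (m.toNat : Int) = (k : Int) + 1
      · rw [if_pos (by omega), if_pos h]
      · rw [if_neg (by omega), if_neg h]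
    have hlen1 : (PySem.List.pySetD c (((k : Nat) : Int) + 1) v).length = c.length :=
      PySem.List.length_pySetD _ _ _
    have hc1 : ∀ d : Int, (k : Int) < d → d ≤ n →
        PySem.List.pyGetD (PySem.List.pySetD c (((k : Nat) : Int) + 1) v) d 0 = pvC es ub lb n d := by
      intro d hd hdn
      rw [hset d (by omega)]
      by_cases hdk : d = (k : Int) + 1
      · subst hdk
        rw [if_pos rfl, hv, hc ((k : Int) + 1 + 1) (by omega) hkn,
          pvC_succ es ub lb n ((k:Int)+1) (by omega)]
      · rw [if_neg hdk]
        exact hc d (by omega) hdn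
    have hsub : ((k:Nat) : Int) + 1 - 1 = ((k:Nat) : Int) := by omega
    obtain ⟨l1, l2, l3⟩ := ih (PySem.List.pySetD c (((k : Nat) : Int) + 1) v)
      (by push_cast at hk ⊢; omega) (by rw [hlen1, hlen]) hc1
    push_cast at l1 l2 l3 ⊢
    rw [hsub] at *
    refine ⟨by rw [l1, hlen1], ?_, l3⟩
    rw [l2, hset 0 le_rfl, if_neg (by omega)]

theorem loop2 (lb : List Int) :
    ∀ (N : Nat) (a : Int) (c : List Int), 1 ≤ a → 0 < c.length →
    (((PySem.List.pyRange a (a + N) 1).foldl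
        (fun c d => PySem.List.pySetD c 0 (PySem.List.pyGetD c 0 0 - PySem.List.pyGetD c d 0 * PySem.List.pyGetD lb (d - 1) 0)) c).length = c.length ∧
     (∀ d : Int, 0 < d → PySem.List.pyGetD ((PySem.List.pyRange a (a + N) 1).foldl
        (fun c d => PySem.List.pySetD c 0 (PySem.List.pyGetD c 0 0 - PySem.List.pyGetD c d 0 * PySem.List.pyGetD lb (d - 1) 0)) c) d 0 = PySem.List.pyGetD c d 0) ∧
     PySem.List.pyGetD ((PySem.List.pyRange a (a + N) 1).foldl
        (fun c d => PySem.List.pySetD c 0 (PySem.List.pyGetD c 0 0 - PySem.List.pyGetD c d 0 * PySem.List.pyGetD lb (d - 1) 0)) c) 0 0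
       = PySem.List.pyGetD c 0 0 - ((PySem.List.pyRange a (a + N) 1).map
           (fun d => PySem.List.pyGetD c d 0 * PySem.List.pyGetD lb (d - 1) 0)).sum) := by
  intro N
  induction N with
  | zero =>
    intro a c ha hc
    rw [show a + (0:Nat) = a by push_cast; ring, PySem.List.pyRange_one_eq_nil le_rfl]
    simp
  | succ N ih =>
    intro a c ha hc
    have hcons : PySem.List.pyRange a (a + (N+1 : Nat)) 1 = a :: PySem.List.pyRange (a+1) (a + (N+1 : Nat)) 1 :=
      PySem.List.pyRange_one_cons (by push_cast; omega)
    have hrest : a + ((N+1 : Nat) : Int) = (a + 1) + (N : Nat) := by push_cast; ring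
    set v := PySem.List.pyGetD c 0 0 - PySem.List.pyGetD c a 0 * PySem.List.pyGetD lb (a - 1) 0 with hv
    set c1 := PySem.List.pySetD c 0 v with hc1
    have hset : ∀ (m : Int), 0 ≤ m → PySem.List.pyGetD c1 m 0
        = if m = 0 then v else PySem.List.pyGetD c m 0 := by
      intro m hm
      have hcast := PySem.List.pyGetD_pySetD_natCast c 0 m.toNat v 0 hc
      push_cast at hcast
      rw [show (m : Int) = ((m.toNat : Nat) : Int) by omega, hc1, hcast]
      by_cases h : m.toNat = 0
      · rw [if_pos h, if_pos (by omega)]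
      · rw [if_neg h, if_neg (by omega)]
    have hlen1 : c1.length = c.length := PySem.List.length_pySetD _ _ _
    obtain ⟨l1, l2, l3⟩ := ih (a+1) c1 (by omega) (by omega)
    rw [hcons]
    simp only [List.foldl_cons, List.map_cons, List.sum_cons]
    rw [hrest]
    refine ⟨by rw [l1, hlen1], ?_, ?_⟩
    · intro d hd
      rw [l2 d hd, hset d (by omega), if_neg (by omega)]
    · rw [l3, hset 0 le_rfl, if_pos rfl, hv]
      have hmap : (PySem.List.pyRange (a+1) ((a+1) + (N:Nat)) 1).map
            (fun d => PySem.List.pyGetD c1 d 0 * PySem.List.pyGetD lb (d - 1) 0)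
          = (PySem.List.pyRange (a+1) ((a+1) + (N:Nat)) 1).map
            (fun d => PySem.List.pyGetD c d 0 * PySem.List.pyGetD lb (d - 1) 0) := by
        apply List.map_congr_left
        intro d hd
        rw [PySem.List.mem_pyRange_one] at hd
        rw [hset d (by omega), if_neg (by omega)]
      rw [hmap]; ring

theorem hornerU (ub lb idx : List Int) (N : Nat) :
    (PySem.List.pyRange 0 (N : Int) 1).foldl
      (fun off d => off * pvW ub lb d + (PySem.List.pyGetD idx d 0 - PySem.List.pyGetD lb d 0)) 0
    = ((List.range N).map (fun (k : Nat) =>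
        (PySem.List.pyGetD idx (k : Int) 0 - PySem.List.pyGetD lb (k : Int) 0) * pvP ub lb ((k : Int) + 1) (N : Int))).sum := by
  induction N with
  | zero => simp [PySem.List.pyRange_one_eq_nil]
  | succ N ih =>
    have hN1 : ((N + 1 : Nat) : Int) = (N : Int) + 1 := by push_cast; ring
    rw [hN1, PySem.List.pyRange_one_succ_right (by positivity), List.foldl_append]
    simp only [List.foldl_cons, List.foldl_nil]
    rw [ih, List.range_succ, List.map_append, List.sum_append]
    have hmap : (List.range N).map (fun (k : Nat) =>
          (PySem.List.pyGetD idx (k : Int) 0 - PySem.List.pyGetD lb (k : Int) 0) * pvP ub lb ((k : Int) + 1) ((N : Int) + 1))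
        = (List.range N).map (fun (k : Nat) =>
          ((PySem.List.pyGetD idx (k : Int) 0 - PySem.List.pyGetD lb (k : Int) 0) * pvP ub lb ((k : Int) + 1) (N : Int)) * pvW ub lb (N : Int)) := by
      apply List.map_congr_left
      intro k hk
      rw [List.mem_range] at hk
      rw [pvP_succ_right ub lb _ _ (by omega)]
      ring
    rw [hmap, List.sum_map_mul_right]
    simp only [List.map_cons, List.map_nil, List.sum_cons, List.sum_nil]
    rw [pvP_self]
    ring

theorem address_eq (base es n : Int) (lb ub idx : List Int) (hn : 0 ≤ n) :
    ((PySem.List.pyRange 0 n 1).foldl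
       (fun a d => a + PySem.List.pyGetD
           ((PySem.List.pyRange 1 (n + 1) 1).foldl
             (fun c d => PySem.List.pySetD c 0
               (PySem.List.pyGetD c 0 0 -
                 PySem.List.pyGetD c d 0 * PySem.List.pyGetD lb (d - 1) 0))
             (PySem.List.pySetD
               ((PySem.List.pyRange (n - 1) 0 (-1)).foldl
                 (fun c d => PySem.List.pySetD c d
                   (PySem.List.pyGetD c (d + 1) 0 *
                     (PySem.List.pyGetD ub d 0 - PySem.List.pyGetD lb d 0 + 1)))
                 (PySem.List.pySetD (List.replicate (n + 1).toNat (0 : Int)) n es))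
               0 base)) (d + 1) 0 * PySem.List.pyGetD idx d 0)
       (PySem.List.pyGetD
           ((PySem.List.pyRange 1 (n + 1) 1).foldl
             (fun c d => PySem.List.pySetD c 0
               (PySem.List.pyGetD c 0 0 -
                 PySem.List.pyGetD c d 0 * PySem.List.pyGetD lb (d - 1) 0))
             (PySem.List.pySetD
               ((PySem.List.pyRange (n - 1) 0 (-1)).foldl
                 (fun c d => PySem.List.pySetD c d
                   (PySem.List.pyGetD c (d + 1) 0 *
                     (PySem.List.pyGetD ub d 0 - PySem.List.pyGetD lb d 0 + 1)))
                 (PySem.List.pySetD (List.replicate (n + 1).toNat (0 : Int)) n es))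
               0 base)) 0 0))
    = base + ((PySem.List.pyRange 0 n 1).foldl
        (fun offset d =>
          (if d ≠ 0 then
            offset * (PySem.List.pyGetD ub d 0 - PySem.List.pyGetD lb d 0 + 1)
          else offset) + (PySem.List.pyGetD idx d 0 - PySem.List.pyGetD lb d 0)) 0) * es := by
  have hNn : ((n.toNat : Nat) : Int) = n := by omega
  set N := n.toNat with hN
  -- ---- B side ----
  have huni : (PySem.List.pyRange 0 n 1).foldl
        (fun offset d =>
          (if d ≠ 0 then
            offset * (PySem.List.pyGetD ub d 0 - PySem.List.pyGetD lb d 0 + 1)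
          else offset) + (PySem.List.pyGetD idx d 0 - PySem.List.pyGetD lb d 0)) 0
      = (PySem.List.pyRange 0 n 1).foldl
        (fun off d => off * pvW ub lb d + (PySem.List.pyGetD idx d 0 - PySem.List.pyGetD lb d 0)) 0 := by
    by_cases hn0 : n ≤ 0
    · rw [PySem.List.pyRange_one_eq_nil hn0]
      rfl
    · rw [PySem.List.pyRange_one_cons (by omega : (0:Int) < n)]
      simp only [List.foldl_cons]
      rw [if_neg (by simp), zero_mul]
      apply PySem.List.foldl_congr_mem
      intro acc x hx
      rw [PySem.List.mem_pyRange_one] at hx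
      rw [if_pos (by omega)]
      simp only [pvW]
  have hB : (PySem.List.pyRange 0 n 1).foldl
        (fun offset d =>
          (if d ≠ 0 then
            offset * (PySem.List.pyGetD ub d 0 - PySem.List.pyGetD lb d 0 + 1)
          else offset) + (PySem.List.pyGetD idx d 0 - PySem.List.pyGetD lb d 0)) 0
      = ((List.range N).map (fun (k : Nat) =>
          (PySem.List.pyGetD idx (k : Int) 0 - PySem.List.pyGetD lb (k : Int) 0) * pvP ub lb ((k : Int) + 1) n)).sum := by
    rw [huni, ← hNn, hornerU ub lb idx N]
  -- ---- A side ----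
  rw [show (fun (c : List Int) (d : Int) => PySem.List.pySetD c d
        (PySem.List.pyGetD c (d + 1) 0 *
          (PySem.List.pyGetD ub d 0 - PySem.List.pyGetD lb d 0 + 1)))
      = (fun (c : List Int) (d : Int) => PySem.List.pySetD c d
        (PySem.List.pyGetD c (d + 1) 0 * pvW ub lb d)) from rfl]
  set c1 : List Int := PySem.List.pySetD (List.replicate (n + 1).toNat (0 : Int)) n es with hc1
  have hlen1 : c1.length = (n + 1).toNat := by
    rw [hc1, PySem.List.length_pySetD, List.length_replicate]
  have hc1top : ∀ d : Int, n - 1 < d → d ≤ n → PySem.List.pyGetD c1 d 0 = pvC es ub lb n d := by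
    intro d h1 h2
    have hdn : d = n := by omega
    subst hdn
    rw [hc1, show (d : Int) = ((d.toNat : Nat) : Int) by omega]
    rw [PySem.List.pyGetD_pySetD_natCast _ _ _ _ _ (by rw [List.length_replicate]; omega)]
    rw [if_pos rfl, pvC, pvP_self, mul_one]
  -- first loop
  have h1 : (((PySem.List.pyRange (n-1) 0 (-1)).foldl
        (fun c d => PySem.List.pySetD c d (PySem.List.pyGetD c (d + 1) 0 * pvW ub lb d)) c1).length = c1.length ∧
      PySem.List.pyGetD ((PySem.List.pyRange (n-1) 0 (-1)).foldl
        (fun c d => PySem.List.pySetD c d (PySem.List.pyGetD c (d + 1) 0 * pvW ub lb d)) c1) 0 0 = PySem.List.pyGetD c1 0 0 ∧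
      (∀ d : Int, 0 < d → d ≤ n → PySem.List.pyGetD ((PySem.List.pyRange (n-1) 0 (-1)).foldl
        (fun c d => PySem.List.pySetD c d (PySem.List.pyGetD c (d + 1) 0 * pvW ub lb d)) c1) d 0 = pvC es ub lb n d)) := by
    by_cases hn1 : 1 ≤ n
    · have hk : (((n-1).toNat : Nat) : Int) = n - 1 := by omega
      have := loop1 es ub lb n (n-1).toNat c1 (by omega) hlen1 (by rw [hk]; exact hc1top)
      rw [hk] at this
      exact this
    · have hn0 : n = 0 := by omega
      rw [PySem.List.pyRange_neg_one_eq_nil (by omega)]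
      exact ⟨rfl, rfl, fun d hd hdn => absurd hdn (by omega)⟩
  set c2 : List Int := (PySem.List.pyRange (n-1) 0 (-1)).foldl
      (fun c d => PySem.List.pySetD c d (PySem.List.pyGetD c (d + 1) 0 * pvW ub lb d)) c1 with hc2
  obtain ⟨h1len, h1zero, h1get⟩ := h1
  -- c3 = c2 with slot 0 = base
  set c3 : List Int := PySem.List.pySetD c2 0 base with hc3
  have hlen2 : c2.length = (n+1).toNat := by rw [h1len, hlen1]
  have hset3 : ∀ (m : Int), 0 ≤ m → PySem.List.pyGetD c3 m 0
      = if m = 0 then base else PySem.List.pyGetD c2 m 0 := by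
    intro m hm
    have hcast := PySem.List.pyGetD_pySetD_natCast c2 0 m.toNat base 0 (by rw [hlen2]; omega)
    push_cast at hcast
    rw [show (m : Int) = ((m.toNat : Nat) : Int) by omega, hc3, hcast]
    by_cases h : m.toNat = 0
    · rw [if_pos h, if_pos (by omega)]
    · rw [if_neg h, if_neg (by omega)]
  have hlen3 : c3.length = (n+1).toNat := by rw [hc3, PySem.List.length_pySetD, hlen2]
  -- second loop
  have h2 := loop2 lb N 1 c3 le_rfl (by omega)
  rw [show (1 : Int) + (N : Nat) = n + 1 by omega] at h2
  obtain ⟨h2len, h2get, h2zero⟩ := h2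
  set c4 : List Int := (PySem.List.pyRange 1 (n+1) 1).foldl
      (fun c d => PySem.List.pySetD c 0 (PySem.List.pyGetD c 0 0 - PySem.List.pyGetD c d 0 * PySem.List.pyGetD lb (d - 1) 0)) c3 with hc4
  -- third loop
  rw [PySem.List.foldl_add]
  -- rewrite the sums
  have hmap2 : (PySem.List.pyRange 1 (n+1) 1).map
        (fun d => PySem.List.pyGetD c3 d 0 * PySem.List.pyGetD lb (d - 1) 0)
      = (PySem.List.pyRange 1 (n+1) 1).map
        (fun d => pvC es ub lb n d * PySem.List.pyGetD lb (d - 1) 0) := by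
    apply List.map_congr_left
    intro d hd
    rw [PySem.List.mem_pyRange_one] at hd
    rw [hset3 d (by omega), if_neg (by omega), h1get d (by omega) (by omega)]
  have hmap3 : (PySem.List.pyRange 0 n 1).map
        (fun d => PySem.List.pyGetD c4 (d + 1) 0 * PySem.List.pyGetD idx d 0)
      = (PySem.List.pyRange 0 n 1).map
        (fun d => pvC es ub lb n (d + 1) * PySem.List.pyGetD idx d 0) := by
    apply List.map_congr_left
    intro d hd
    rw [PySem.List.mem_pyRange_one] at hd
    rw [h2get (d+1) (by omega), hset3 (d+1) (by omega), if_neg (by omega),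
      h1get (d+1) (by omega) (by omega)]
  rw [h2zero, hset3 0 le_rfl, if_pos rfl, hmap2, hmap3, hB]
  -- reindex both pyRange sums to List.range N
  have hr2 : (PySem.List.pyRange 1 (n+1) 1).map
        (fun d => pvC es ub lb n d * PySem.List.pyGetD lb (d - 1) 0)
      = (List.range N).map
        (fun (k : Nat) => pvC es ub lb n ((k : Int) + 1) * PySem.List.pyGetD lb (k : Int) 0) := by
    rw [PySem.List.pyRange_one 1 (n+1), List.map_map]
    rw [show (n + 1 - 1).toNat = N by omega]
    apply List.map_congr_left
    intro k hk
    simp only [Function.comp]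
    rw [show (1 : Int) + (k : Int) = (k : Int) + 1 by ring, show (k : Int) + 1 - 1 = (k : Int) by ring]
  have hr3 : (PySem.List.pyRange 0 n 1).map
        (fun d => pvC es ub lb n (d + 1) * PySem.List.pyGetD idx d 0)
      = (List.range N).map
        (fun (k : Nat) => pvC es ub lb n ((k : Int) + 1) * PySem.List.pyGetD idx (k : Int) 0) := by
    rw [PySem.List.pyRange_one 0 n, List.map_map]
    rw [show (n - 0).toNat = N by omega]
    apply List.map_congr_left
    intro k hk
    simp only [Function.comp]
    rw [show (0 : Int) + (k : Int) = (k : Int) by ring]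
  rw [hr2, hr3]
  -- final arithmetic
  rw [← List.sum_map_mul_right]
  have hfin : (List.range N).map (fun (k : Nat) =>
        (PySem.List.pyGetD idx (k : Int) 0 - PySem.List.pyGetD lb (k : Int) 0) * pvP ub lb ((k : Int) + 1) n * es)
      = (List.range N).map (fun (k : Nat) =>
        pvC es ub lb n ((k : Int) + 1) * PySem.List.pyGetD idx (k : Int) 0 +
        (- (pvC es ub lb n ((k : Int) + 1) * PySem.List.pyGetD lb (k : Int) 0))) := by
    apply List.map_congr_left
    intro k hk
    simp only [pvC]
    ring
  rw [hfin, PySem.List.sum_map_add_int]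
  have hneg : ((List.range N).map (fun (k : Nat) =>
        - (pvC es ub lb n ((k : Int) + 1) * PySem.List.pyGetD lb (k : Int) 0))).sum
      = - ((List.range N).map (fun (k : Nat) =>
        pvC es ub lb n ((k : Int) + 1) * PySem.List.pyGetD lb (k : Int) 0)).sum := by
    rw [show (fun k : Nat => - (pvC es ub lb n ((k : Int) + 1) * PySem.List.pyGetD lb (k : Int) 0))
        = (fun k : Nat => (pvC es ub lb n ((k : Int) + 1) * PySem.List.pyGetD lb (k : Int) 0) * (-1)) by funext k; ring]
    rw [List.sum_map_mul_right]
    ring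
  rw [hneg]
  ring

-- ===== VERDICT (by name: the statement is the Claim_ definition above) =====
theorem physical_address_spec : Claim_equal_physical_address := by
  intro name base element_size dimensions lower_bounds upper_bounds indices hdom hpre
  unfold Spec_physical_address
  obtain ⟨hn, h1, h2, h3⟩ := hpre
  simp only [physical_address, physical_address_alt]
  rw [address_eq base element_size dimensions lower_bounds upper_bounds indices hn]
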